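-- pv_equiv track=rewrite | github.com/paveleroshkinweb/algorithms | algorithms/src/problems/prefix_suffix_substr.py | find_prefix_suffix_substr
-- ===== SOURCE A (Python) =====
-- def find_prefix_suffix_substr(s):
--     prefixes = get_all_prefixes(s)
--     suffixes = get_all_suffixes(s)
--     intersection = prefixes.intersection(suffixes)
--     pref_suff = prefixes | suffixes
--     count = 0
--     for i in range(0, len(s)+1):
--         for j in range(i+1, len(s)+1):
--             substr = s[i:j]
--             if substr not in intersection and substr in pref_suff:
--                 count += 1
--     return count
--
-- def get_all_prefixes(s):
--     prefixes = set()
--     for i in range(1, len(s)):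
--         prefixes.add(s[:i])
--     return prefixes
--
-- def get_all_suffixes(s):
--     suffixes = set()
--     for i in range(1, len(s)):
--         suffixes.add(s[len(s)-i:len(s)])
--     return suffixes
-- ===== SOURCE B (Python) =====
-- def find_prefix_suffix_substr(s):
--     n = len(s)
--     count = 0
--     for L in range(1, n):
--         p = s[:L]
--         q = s[n-L:]
--         if p != q:
--             for i in range(0, n - L + 1):
--                 t = s[i:i+L]
--                 count += (t == p) + (t == q)
--     return count
-- ===== Notes on version B (the rewrite author's own statement) =====
-- stated objective: alternative
-- what changed: B drops A's prefix/suffix set constructions and per-substring set-membership tests entirely: it iterates over lengths L, skips any L whose length-L prefix equals the length-L suffix, and directly counts the occurrences of that prefix and suffix among the length-L substrings (a proper prefix and a proper suffix of equal length are the only candidates of that length).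
import Mathlib
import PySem

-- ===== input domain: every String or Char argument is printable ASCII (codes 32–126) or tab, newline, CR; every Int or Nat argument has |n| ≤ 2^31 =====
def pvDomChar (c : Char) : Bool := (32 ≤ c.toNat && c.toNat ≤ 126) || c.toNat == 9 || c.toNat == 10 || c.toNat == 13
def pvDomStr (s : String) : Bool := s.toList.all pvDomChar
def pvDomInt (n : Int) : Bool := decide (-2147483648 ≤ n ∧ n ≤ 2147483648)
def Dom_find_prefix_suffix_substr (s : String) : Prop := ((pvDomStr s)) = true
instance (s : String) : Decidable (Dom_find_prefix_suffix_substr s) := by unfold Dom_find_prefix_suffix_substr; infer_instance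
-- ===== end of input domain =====

-- B replaces A's prefix/suffix sets and O(n^2) membership tests over all (i,j) substrings by a
-- single loop over lengths L, counting matches of the length-L prefix and suffix directly and
-- skipping lengths whose prefix equals the suffix (same worst-case asymptotics, different algorithm).

-- ===== PORT A =====
def get_all_prefixes (s : String) : PySem.Set String :=
  (PySem.List.pyRange 1 (PySem.Str.len s)).foldl
    (fun prefixes i => PySem.Set.add prefixes (PySem.Str.slice s none (some i)))
    PySem.Set.empty

def get_all_suffixes (s : String) : PySem.Set String :=
  (PySem.List.pyRange 1 (PySem.Str.len s)).foldl
    (fun suffixes i =>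
      PySem.Set.add suffixes (PySem.Str.slice s (some (PySem.Str.len s - i)) (some (PySem.Str.len s))))
    PySem.Set.empty

def find_prefix_suffix_substr (s : String) : Int :=
  let prefixes := get_all_prefixes s
  let suffixes := get_all_suffixes s
  let intersection := prefixes.inter suffixes
  let pref_suff := prefixes.union suffixes
  (PySem.List.pyRange 0 (PySem.Str.len s + 1)).foldl (fun count i =>
    (PySem.List.pyRange (i + 1) (PySem.Str.len s + 1)).foldl (fun count j =>
      let substr := PySem.Str.slice s (some i) (some j)
      if ¬ intersection.contains substr ∧ pref_suff.contains substr then count + 1 else count)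
      count) 0

-- ===== PORT B =====
def find_prefix_suffix_substr_alt (s : String) : Int :=
  let n := PySem.Str.len s
  (PySem.List.pyRange 1 n).foldl (fun count L =>
    let p := PySem.Str.slice s none (some L)
    let q := PySem.Str.slice s (some (n - L)) none
    if p ≠ q then
      (PySem.List.pyRange 0 (n - L + 1)).foldl (fun count i =>
        let t := PySem.Str.slice s (some i) (some (i + L))
        count + (if t = p then 1 else 0) + (if t = q then 1 else 0)) count
    else count) 0

-- ===== PRECONDITION & SPEC =====
def Spec_find_prefix_suffix_substr (s : String) (out : Int) : Prop := out = find_prefix_suffix_substr_alt s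
instance (s : String) (out : Int) : Decidable (Spec_find_prefix_suffix_substr s out) := by unfold Spec_find_prefix_suffix_substr; infer_instance

-- ===== CLAIM (what is proved, stated in full; the proofs are below) =====
def Claim_equal_find_prefix_suffix_substr : Prop := ∀ (s : String), Dom_find_prefix_suffix_substr s → Spec_find_prefix_suffix_substr s (find_prefix_suffix_substr s)

-- ===== LEMMAS AND PROOFS =====
theorem pyRange_natCast' (a b : ℕ) :
    PySem.List.pyRange (a : Int) (b : Int) = (List.range' a (b - a)).map (Nat.cast : ℕ → Int) := by
  rcases Nat.le_total b a with h | h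
  · rw [PySem.List.pyRange_one_eq_nil (by exact_mod_cast h)]
    simp [Nat.sub_eq_zero_of_le h]
  · obtain ⟨d, rfl⟩ := Nat.exists_eq_add_of_le h
    clear h
    induction d generalizing a with
    | zero => simp [PySem.List.pyRange_one_eq_nil]
    | succ d ih =>
      rw [PySem.List.pyRange_one_cons (by push_cast; omega)]
      have h1 : ((a : Int) + 1) = ((a + 1 : ℕ) : Int) := by push_cast; ring
      have h2 : ((a + (d+1) : ℕ) : Int) = ((a + 1 + d : ℕ) : Int) := by push_cast; ring
      rw [h1, h2, ih (a+1)]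
      have h3 : a + (d + 1) - a = d + 1 := by omega
      have h4 : a + 1 + d - (a + 1) = d := by omega
      rw [h3, h4, List.range'_succ]
      simp

theorem mem_get_all_prefixes (s t : String) :
    t ∈ get_all_prefixes s ↔
      ∃ k : ℕ, 1 ≤ k ∧ k < s.toList.length ∧ t.toList = s.toList.take k := by
  unfold get_all_prefixes
  rw [show (PySem.List.pyRange 1 (PySem.Str.len s)).foldl
        (fun prefixes i => PySem.Set.add prefixes (PySem.Str.slice s none (some i)))
        PySem.Set.empty
      = PySem.Set.ofList ((PySem.List.pyRange 1 (PySem.Str.len s)).map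
          (fun i => PySem.Str.slice s none (some i))) by
    rw [PySem.Set.ofList_eq_foldl, List.foldl_map]; rfl]
  rw [PySem.Set.mem_ofList, List.mem_map]
  constructor
  · rintro ⟨i, hi, rfl⟩
    rw [PySem.Str.len_eq, PySem.List.mem_pyRange_one] at hi
    lift i to ℕ using (by omega) with k
    refine ⟨k, by omega, by exact_mod_cast hi.2, ?_⟩
    rw [PySem.Str.toList_slice]
    simp [PySem.Chars.slice_eq_listSlice, PySem.List.slice_to_natCast]
  · rintro ⟨k, h1, h2, ht⟩
    refine ⟨(k : Int), ?_, ?_⟩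
    · rw [PySem.Str.len_eq, PySem.List.mem_pyRange_one]
      constructor <;> [exact_mod_cast h1; exact_mod_cast h2]
    · apply String.toList_inj.mp
      rw [PySem.Str.toList_slice]
      simp [PySem.Chars.slice_eq_listSlice, PySem.List.slice_to_natCast, ht]

theorem mem_get_all_suffixes (s t : String) :
    t ∈ get_all_suffixes s ↔
      ∃ k : ℕ, 1 ≤ k ∧ k < s.toList.length ∧ t.toList = s.toList.drop (s.toList.length - k) := by
  unfold get_all_suffixes
  rw [show (PySem.List.pyRange 1 (PySem.Str.len s)).foldl
        (fun suffixes i =>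
          PySem.Set.add suffixes (PySem.Str.slice s (some (PySem.Str.len s - i)) (some (PySem.Str.len s))))
        PySem.Set.empty
      = PySem.Set.ofList ((PySem.List.pyRange 1 (PySem.Str.len s)).map
          (fun i => PySem.Str.slice s (some (PySem.Str.len s - i)) (some (PySem.Str.len s)))) by
    rw [PySem.Set.ofList_eq_foldl, List.foldl_map]; rfl]
  rw [PySem.Set.mem_ofList, List.mem_map]
  have hsl : ∀ k : ℕ, 1 ≤ k → k < s.toList.length →
      (PySem.Str.slice s (some (PySem.Str.len s - (k:Int))) (some (PySem.Str.len s))).toList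
      = s.toList.drop (s.toList.length - k) := by
    intro k h1 h2
    rw [PySem.Str.toList_slice, PySem.Str.len_eq]
    have hc : ((s.toList.length : Int) - (k : Int)) = ((s.toList.length - k : ℕ) : Int) := by
      push_cast [Nat.cast_sub (le_of_lt h2)]; ring
    rw [hc]
    simp only [PySem.Chars.slice_eq_listSlice, PySem.List.slice_natCast]
    apply List.take_of_length_le
    simp
  constructor
  · rintro ⟨i, hi, rfl⟩
    rw [PySem.Str.len_eq, PySem.List.mem_pyRange_one] at hi
    lift i to ℕ using (by omega) with k
    exact ⟨k, by omega, by exact_mod_cast hi.2, hsl k (by omega) (by exact_mod_cast hi.2)⟩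
  · rintro ⟨k, h1, h2, ht⟩
    refine ⟨(k : Int), ?_, ?_⟩
    · rw [PySem.Str.len_eq, PySem.List.mem_pyRange_one]
      constructor <;> [exact_mod_cast h1; exact_mod_cast h2]
    · apply String.toList_inj.mp
      rw [hsl k h1 h2, ht]

theorem tri_swap (N : ℕ) (g : ℕ → ℕ → ℤ) :
    ∑ i ∈ Finset.range (N+1), ∑ m ∈ Finset.range (N - i), g i m
    = ∑ m ∈ Finset.range N, ∑ i ∈ Finset.range (N - m), g i m := by
  rw [← Finset.sum_sigma (Finset.range (N+1)) (fun i => Finset.range (N-i)) (fun p => g p.1 p.2),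
      ← Finset.sum_sigma (Finset.range N) (fun m => Finset.range (N-m)) (fun p => g p.2 p.1)]
  refine Finset.sum_nbij' (fun p => ⟨p.2, p.1⟩) (fun p => ⟨p.2, p.1⟩) ?_ ?_ ?_ ?_ ?_
  · rintro ⟨i, m⟩ h
    simp only [Finset.mem_sigma, Finset.mem_range] at h ⊢
    omega
  · rintro ⟨m, i⟩ h
    simp only [Finset.mem_sigma, Finset.mem_range] at h ⊢
    omega
  · rintro ⟨i, m⟩ _; rfl
  · rintro ⟨m, i⟩ _; rfl
  · rintro ⟨i, m⟩ _; rfl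

def cntLI (l : List Char) (L i : ℕ) : ℤ :=
  (if (l.drop i).take L = l.take L then 1 else 0) +
  (if (l.drop i).take L = l.drop (l.length - L) then 1 else 0)

def bterm (l : List Char) (L : ℕ) : ℤ :=
  if l.take L ≠ l.drop (l.length - L) then
    ∑ i ∈ Finset.range (l.length - L + 1), cntLI l L i
  else 0

theorem sum_map_range' (n : ℕ) (f : ℕ → ℤ) :
    ((List.range n).map f).sum = ∑ i ∈ Finset.range n, f i := rfl

theorem inner_fold_eq (s : String) (L : ℕ) (hLn : L ≤ s.toList.length) (acc : ℤ) :
    (PySem.List.pyRange 0 ((s.toList.length : ℤ) - (L:ℤ) + 1)).foldl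
      (fun count i =>
        count + (if PySem.Str.slice s (some i) (some (i + (L:ℤ))) = PySem.Str.slice s none (some (L:ℤ)) then 1 else 0)
              + (if PySem.Str.slice s (some i) (some (i + (L:ℤ))) = PySem.Str.slice s (some ((s.toList.length:ℤ) - (L:ℤ))) then 1 else 0)) acc
    = acc + ∑ i ∈ Finset.range (s.toList.length - L + 1), cntLI s.toList L i := by
  have hc : ((s.toList.length:ℤ) - (L:ℤ) + 1) = ((s.toList.length - L + 1 : ℕ) : ℤ) := by omega
  have hq : ((s.toList.length:ℤ) - (L:ℤ)) = ((s.toList.length - L : ℕ) : ℤ) := by omega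
  rw [hc, hq, PySem.List.pyRange_zero_natCast, List.foldl_map]
  refine (PySem.List.foldl_congr_mem _ _
      (fun (count : ℤ) (i : ℕ) => count + cntLI s.toList L i) _ ?_).trans
    (by rw [PySem.List.foldl_add, sum_map_range'])
  intro acc2 i _
  show _ = acc2 + cntLI s.toList L i
  have h1 : (PySem.Str.slice s (some (i:ℤ)) (some ((i:ℤ) + (L:ℤ)))
      = PySem.Str.slice s none (some (L:ℤ))) ↔
      ((s.toList.drop i).take L = s.toList.take L) := by
    rw [← String.toList_inj, PySem.Str.toList_slice, PySem.Str.toList_slice]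
    simp [PySem.Chars.slice_eq_listSlice, PySem.List.slice_natCast_add,
      PySem.List.slice_to_natCast]
  have h2 : (PySem.Str.slice s (some (i:ℤ)) (some ((i:ℤ) + (L:ℤ)))
      = PySem.Str.slice s (some (((s.toList.length - L : ℕ)):ℤ))) ↔
      ((s.toList.drop i).take L = s.toList.drop (s.toList.length - L)) := by
    rw [← String.toList_inj, PySem.Str.toList_slice, PySem.Str.toList_slice]
    simp [PySem.Chars.slice_eq_listSlice, PySem.List.slice_natCast_add,
      PySem.List.slice_from_natCast]
  rw [if_congr h1 rfl rfl, if_congr h2 rfl rfl, cntLI, add_assoc]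

theorem B_eq (s : String) :
    find_prefix_suffix_substr_alt s
    = ∑ m ∈ Finset.range (s.toList.length - 1), bterm s.toList (m+1) := by
  simp only [find_prefix_suffix_substr_alt, PySem.Str.len_eq]
  have hpr := pyRange_natCast' 1 s.toList.length
  rw [Nat.cast_one] at hpr
  rw [hpr, List.range'_eq_map_range, List.map_map, List.foldl_map]
  refine (PySem.List.foldl_congr_mem _ _
      (fun (count : ℤ) (m : ℕ) => count + bterm s.toList (1+m)) _ ?_).trans
    (by rw [PySem.List.foldl_add, sum_map_range']; simp only [zero_add, Nat.add_comm])
  intro acc m hm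
  show _ = acc + bterm s.toList (1+m)
  rw [List.mem_range] at hm
  simp only [Function.comp_apply]
  have hLn : 1 + m ≤ s.toList.length := by omega
  have hq : ((s.toList.length:ℤ) - ((1+m:ℕ):ℤ)) = ((s.toList.length - (1+m) : ℕ):ℤ) := by omega
  have hiff : (PySem.Str.slice s none (some ((1+m:ℕ):ℤ))
      ≠ PySem.Str.slice s (some ((s.toList.length:ℤ) - ((1+m:ℕ):ℤ)))) ↔
      (s.toList.take (1+m) ≠ s.toList.drop (s.toList.length - (1+m))) := by
    rw [not_iff_not, ← String.toList_inj, PySem.Str.toList_slice, PySem.Str.toList_slice, hq]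
    simp only [PySem.Chars.slice_eq_listSlice, PySem.List.slice_to_natCast,
      PySem.List.slice_from_natCast]
  rw [if_congr hiff rfl rfl]
  by_cases hpq : s.toList.take (1+m) ≠ s.toList.drop (s.toList.length - (1+m))
  · rw [if_pos hpq, bterm, if_pos hpq]
    exact inner_fold_eq s (1+m) hLn acc
  · rw [if_neg hpq, bterm, if_neg hpq, add_zero]

def aind (l : List Char) (i L : ℕ) : ℤ :=
  if (¬((L < l.length ∧ (l.drop i).take L = l.take L)
        ∧ (L < l.length ∧ (l.drop i).take L = l.drop (l.length - L)))
      ∧ ((L < l.length ∧ (l.drop i).take L = l.take L)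
        ∨ (L < l.length ∧ (l.drop i).take L = l.drop (l.length - L))))
  then 1 else 0

theorem mem_prefixes_len (s t : String) (L : ℕ) (hLt : t.toList.length = L) (hL1 : 1 ≤ L) :
    t ∈ get_all_prefixes s ↔ (L < s.toList.length ∧ t.toList = s.toList.take L) := by
  rw [mem_get_all_prefixes]
  constructor
  · rintro ⟨k, h1, h2, ht⟩
    have hk : k = L := by
      have := congrArg List.length ht
      simp only [List.length_take] at this
      omega
    subst hk
    exact ⟨h2, ht⟩
  · rintro ⟨h2, ht⟩
    exact ⟨L, hL1, h2, ht⟩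

theorem mem_suffixes_len (s t : String) (L : ℕ) (hLt : t.toList.length = L) (hL1 : 1 ≤ L) :
    t ∈ get_all_suffixes s ↔
      (L < s.toList.length ∧ t.toList = s.toList.drop (s.toList.length - L)) := by
  rw [mem_get_all_suffixes]
  constructor
  · rintro ⟨k, h1, h2, ht⟩
    have hk : k = L := by
      have := congrArg List.length ht
      simp only [List.length_drop] at this
      omega
    subst hk
    exact ⟨h2, ht⟩
  · rintro ⟨h2, ht⟩
    exact ⟨L, hL1, h2, ht⟩

theorem A_inner_fold_eq (s : String) (i : ℕ) (hi : i ≤ s.toList.length) (acc : ℤ) :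
    (PySem.List.pyRange ((i:ℤ) + 1) ((s.toList.length : ℤ) + 1)).foldl
      (fun count j =>
        if ¬ ((get_all_prefixes s).inter (get_all_suffixes s)).contains
              (PySem.Str.slice s (some (i:ℤ)) (some j))
           ∧ ((get_all_prefixes s).union (get_all_suffixes s)).contains
              (PySem.Str.slice s (some (i:ℤ)) (some j))
        then count + 1 else count) acc
    = acc + ∑ m ∈ Finset.range (s.toList.length - i), aind s.toList i (m+1) := by
  have h1 : ((i:ℤ) + 1) = ((i+1 : ℕ) : ℤ) := by omega
  have h2 : ((s.toList.length:ℤ) + 1) = ((s.toList.length + 1 : ℕ) : ℤ) := by omega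
  rw [h1, h2, pyRange_natCast' (i+1) (s.toList.length+1), List.range'_eq_map_range,
    List.map_map, List.foldl_map]
  have hlen : s.toList.length + 1 - (i+1) = s.toList.length - i := by omega
  rw [hlen]
  refine (PySem.List.foldl_congr_mem _ _
      (fun (count : ℤ) (m : ℕ) => count + aind s.toList i (m+1)) _ ?_).trans
    (by rw [PySem.List.foldl_add, sum_map_range'])
  intro acc2 m hm
  show _ = acc2 + aind s.toList i (m+1)
  rw [List.mem_range] at hm
  simp only [Function.comp_apply]
  -- substr : slice s i (i+1+m), toList = (drop i).take (m+1)
  have htl : (PySem.Str.slice s (some (i:ℤ)) (some ((i+1+m : ℕ):ℤ))).toList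
      = (s.toList.drop i).take (m+1) := by
    rw [PySem.Str.toList_slice]
    simp only [PySem.Chars.slice_eq_listSlice, PySem.List.slice_natCast]
    congr 1
    omega
  have hlt : (PySem.Str.slice s (some (i:ℤ)) (some ((i+1+m : ℕ):ℤ))).toList.length = m+1 := by
    rw [htl]
    simp only [List.length_take, List.length_drop]
    omega
  have hcond : (¬ ((get_all_prefixes s).inter (get_all_suffixes s)).contains
          (PySem.Str.slice s (some (i:ℤ)) (some ((i+1+m : ℕ):ℤ)))
        ∧ ((get_all_prefixes s).union (get_all_suffixes s)).contains
          (PySem.Str.slice s (some (i:ℤ)) (some ((i+1+m : ℕ):ℤ))))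
      ↔ (¬(((m+1) < s.toList.length ∧ (s.toList.drop i).take (m+1) = s.toList.take (m+1))
            ∧ ((m+1) < s.toList.length ∧ (s.toList.drop i).take (m+1) = s.toList.drop (s.toList.length - (m+1))))
          ∧ (((m+1) < s.toList.length ∧ (s.toList.drop i).take (m+1) = s.toList.take (m+1))
            ∨ ((m+1) < s.toList.length ∧ (s.toList.drop i).take (m+1) = s.toList.drop (s.toList.length - (m+1))))) := by
    rw [PySem.Set.contains_iff, PySem.Set.contains_iff, PySem.Set.mem_inter, PySem.Set.mem_union,
      mem_prefixes_len s _ (m+1) hlt (by omega), mem_suffixes_len s _ (m+1) hlt (by omega), htl]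
  rw [aind]
  rw [if_congr (by exact_mod_cast hcond) rfl rfl]
  split_ifs <;> simp

theorem A_eq (s : String) :
    find_prefix_suffix_substr s
    = ∑ i ∈ Finset.range (s.toList.length + 1),
        ∑ m ∈ Finset.range (s.toList.length - i), aind s.toList i (m+1) := by
  simp only [find_prefix_suffix_substr, PySem.Str.len_eq]
  have h2 : ((s.toList.length:ℤ) + 1) = ((s.toList.length + 1 : ℕ) : ℤ) := by omega
  rw [h2, PySem.List.pyRange_zero_natCast, List.foldl_map]
  refine (PySem.List.foldl_congr_mem _ _
      (fun (count : ℤ) (i : ℕ) =>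
        count + ∑ m ∈ Finset.range (s.toList.length - i), aind s.toList i (m+1)) _ ?_).trans
    (by rw [PySem.List.foldl_add, sum_map_range']; simp)
  intro acc i hi
  rw [List.mem_range] at hi
  show _ = acc + ∑ m ∈ Finset.range (s.toList.length - i), aind s.toList i (m+1)
  exact A_inner_fold_eq s i (by omega) acc

theorem aind_len (l : List Char) (i : ℕ) : aind l i l.length = 0 := by
  rw [aind, if_neg]
  rintro ⟨-, hor⟩
  rcases hor with h | h <;> exact absurd h.1 (lt_irrefl _)

theorem mid_eq (l : List Char) (m : ℕ) (hm : m < l.length - 1) :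
    ∑ i ∈ Finset.range (l.length - m), aind l i (m+1) = bterm l (m+1) := by
  have hL : m + 1 < l.length := by omega
  have hr : l.length - m = l.length - (m+1) + 1 := by omega
  rw [bterm]
  by_cases heq : l.take (m+1) = l.drop (l.length - (m+1))
  · rw [if_neg (not_not_intro heq)]
    apply Finset.sum_eq_zero
    intro i _
    rw [aind, if_neg]
    rintro ⟨hnpq, hor⟩
    apply hnpq
    rcases hor with h | h
    · exact ⟨h, ⟨h.1, heq ▸ h.2⟩⟩
    · exact ⟨⟨h.1, heq ▸ h.2⟩, h⟩
  · rw [if_pos heq, hr]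
    apply Finset.sum_congr rfl
    intro i _
    rw [aind, cntLI]
    by_cases hP : (l.drop i).take (m+1) = l.take (m+1) <;>
      by_cases hQ : (l.drop i).take (m+1) = l.drop (l.length - (m+1))
    · exact absurd (hP.symm.trans hQ) heq
    · rw [if_pos ⟨fun h => hQ h.2.2, Or.inl ⟨hL, hP⟩⟩, if_pos hP, if_neg hQ]; norm_num
    · rw [if_pos ⟨fun h => hP h.1.2, Or.inr ⟨hL, hQ⟩⟩, if_neg hP, if_pos hQ]; norm_num
    · rw [if_neg ?_, if_neg hP, if_neg hQ]
      · norm_num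
      rintro ⟨-, hor⟩
      rcases hor with h | h
      · exact hP h.2
      · exact hQ h.2

theorem sums_eq (l : List Char) :
    ∑ i ∈ Finset.range (l.length + 1), ∑ m ∈ Finset.range (l.length - i), aind l i (m+1)
    = ∑ m ∈ Finset.range (l.length - 1), bterm l (m+1) := by
  rw [tri_swap l.length (fun i m => aind l i (m+1))]
  rcases Nat.eq_zero_or_pos l.length with h0 | hpos
  · simp [h0]
  · have hn : l.length = (l.length - 1) + 1 := by omega
    rw [show Finset.range l.length = Finset.range ((l.length - 1) + 1) by rw [← hn],
      Finset.sum_range_succ]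
    have hlast : ∑ i ∈ Finset.range (l.length - (l.length - 1)), aind l i ((l.length - 1) + 1) = 0 := by
      apply Finset.sum_eq_zero
      intro i _
      rw [show (l.length - 1) + 1 = l.length by omega]
      exact aind_len l i
    rw [hlast, add_zero]
    exact Finset.sum_congr rfl fun m hm => mid_eq l m (Finset.mem_range.mp hm)

-- ===== VERDICT (by name: the statement is the Claim_ definition above) =====
theorem find_prefix_suffix_substr_spec : Claim_equal_find_prefix_suffix_substr := by
  intro s _
  show find_prefix_suffix_substr s = find_prefix_suffix_substr_alt s
  rw [A_eq, B_eq, sums_eq]
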